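-- pv_equiv track=rewrite | github.com/seamile/ImgSearch | src/imgsearch/utils.py | multi_pop
-- ===== SOURCE A (Python) =====
-- def multi_pop(lst: list, indices: list[int]):
--     """Pop multiple indices from a list"""
--     idx_set = set(indices)  # O(1)
--     removed, kept = [], []
--     for i, v in enumerate(lst):
--         if i in idx_set:
--             removed.append(v)
--         else:
--             kept.append(v)
--     lst[:] = kept  # In-place modification
--     return removed
-- ===== SOURCE B (Python) =====
-- def multi_pop(lst: list, indices: list[int]):
--     """Pop multiple indices from a list (direct indexing instead of scanning
--     every element with a membership test; same in-place mutation of lst)."""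
--     n = len(lst)
--     valid = sorted({i for i in indices if 0 <= i < n})
--     removed = [lst[i] for i in valid]
--     for i in reversed(valid):
--         del lst[i]
--     return removed
-- ===== Notes on version B (the rewrite author's own statement) =====
-- stated objective: alternative
-- what changed: Instead of scanning every element of lst with a per-element set-membership test, B sorts the distinct in-range indices, reads the removed elements directly at those positions, and deletes them in place in descending order; the per-element scan disappears.
import Mathlib
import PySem

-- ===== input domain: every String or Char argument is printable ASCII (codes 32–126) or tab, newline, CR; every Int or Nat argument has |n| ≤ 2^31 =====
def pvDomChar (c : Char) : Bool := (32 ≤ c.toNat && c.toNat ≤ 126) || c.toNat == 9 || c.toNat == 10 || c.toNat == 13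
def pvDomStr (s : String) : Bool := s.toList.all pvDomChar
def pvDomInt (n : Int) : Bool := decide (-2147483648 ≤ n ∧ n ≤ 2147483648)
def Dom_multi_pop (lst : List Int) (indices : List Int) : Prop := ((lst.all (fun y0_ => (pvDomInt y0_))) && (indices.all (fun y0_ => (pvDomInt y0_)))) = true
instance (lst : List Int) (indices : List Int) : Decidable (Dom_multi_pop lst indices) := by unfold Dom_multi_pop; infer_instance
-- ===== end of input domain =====

-- B replaces A's full scan with a membership test per element by direct indexing at the
-- sorted distinct in-range indices; equivalence is about the RETURN value only (both
-- Pythons mutate lst in place to the same kept list).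

-- ===== PORT A =====
-- A: idx_set = set(indices); one pass over enumerate(lst) appending to removed/kept; returns removed.
def multi_pop (lst : List Int) (indices : List Int) : List Int :=
  let idx_set : PySem.Set Int := PySem.Set.ofList indices
  let rk :=
    (PySem.List.enumerate lst).foldl
      (fun (s : List Int × List Int) p =>
        if PySem.Set.contains idx_set p.1 then (s.1 ++ [p.2], s.2) else (s.1, s.2 ++ [p.2]))
      ([], [])
  rk.1

-- ===== PORT B =====
-- B: valid = sorted({i in indices | 0 ≤ i < len}); removed = [lst[i] for i in valid].
def multi_pop_alt (lst : List Int) (indices : List Int) : List Int :=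
  let n : Int := lst.length
  let valid :=
    PySem.List.sorted
      (PySem.Set.ofList (indices.filter (fun i => decide (0 ≤ i) && decide (i < n))))
      (fun i => i)
  valid.map (fun i => PySem.List.pyGetD lst i 0)  -- lst[i]; valid guarantees 0 ≤ i < len

-- ===== PRECONDITION & SPEC =====
def Spec_multi_pop (lst : List Int) (indices : List Int) (out : List Int) : Prop := out = multi_pop_alt lst indices
instance (lst : List Int) (indices : List Int) (out : List Int) : Decidable (Spec_multi_pop lst indices out) := by unfold Spec_multi_pop; infer_instance

-- ===== CLAIM (what is proved, stated in full; the proofs are below) =====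
def Claim_equal_multi_pop : Prop := ∀ (lst : List Int) (indices : List Int), Dom_multi_pop lst indices → Spec_multi_pop lst indices (multi_pop lst indices)

-- ===== LEMMAS AND PROOFS =====

-- Common characterisation: the elements of lst at positions satisfying c, in order.
def pvPick (lst : List Int) (c : Int → Bool) : List Int :=
  match lst with
  | [] => []
  | v :: t => if c 0 then v :: pvPick t (fun i => c (i + 1)) else pvPick t (fun i => c (i + 1))

lemma pick_enumerate (lst : List Int) (c : Int → Bool) :
    ∀ start : Int,
      ((PySem.List.enumerate lst start).filter (fun p => c p.1)).map Prod.snd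
        = pvPick lst (fun i => c (i + start)) := by
  induction lst with
  | nil => intro start; simp [PySem.List.enumerate, pvPick]
  | cons v t ih =>
    intro start
    simp only [PySem.List.enumerate, List.filter_cons, pvPick]
    have hshift : (fun i => c (i + 1 + start)) = (fun i => c (i + (start + 1))) := by
      funext i; ring_nf
    by_cases h : c start
    · simp [h, ih (start + 1), ← hshift]
    · simp [h, ih (start + 1), ← hshift]

lemma pick_range (lst : List Int) (c : Int → Bool) :
    ((List.range lst.length).filter (fun (j : Nat) => c ((j : Nat) : Int))).map
        (fun (j : Nat) => PySem.List.pyGetD lst ((j : Nat) : Int) 0)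
      = pvPick lst c := by
  induction lst generalizing c with
  | nil => simp [pvPick]
  | cons v t ih =>
    have hget : ∀ j : Nat,
        PySem.List.pyGetD (v :: t) ((j : Int) + 1) 0 = PySem.List.pyGetD t (j : Int) 0 := by
      intro j
      simp [PySem.List.pyGetD, PySem.List.pyGet?, PySem.List.pyIdx?]
      split_ifs <;> simp_all <;> omega
    have hrest :
        ((((List.range t.length).map Nat.succ).filter (fun (j : Nat) => c ((j : Nat) : Int))).map
            (fun (j : Nat) => PySem.List.pyGetD (v :: t) ((j : Nat) : Int) 0))
          = pvPick t (fun i => c (i + 1)) := by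
      rw [List.filter_map, List.map_map]
      have h1 : ((fun (j : Nat) => c ((j : Nat) : Int)) ∘ Nat.succ)
          = (fun (j : Nat) => c (((j : Nat) : Int) + 1)) := by
        funext j; simp only [Function.comp, Nat.succ_eq_add_one]; push_cast; ring_nf
      have h2 : ((fun (j : Nat) => PySem.List.pyGetD (v :: t) ((j : Nat) : Int) 0) ∘ Nat.succ)
          = (fun (j : Nat) => PySem.List.pyGetD t ((j : Nat) : Int) 0) := by
        funext j
        simp only [Function.comp, Nat.succ_eq_add_one]
        have hc : (((j + 1 : Nat)) : Int) = ((j : Nat) : Int) + 1 := by push_cast; ring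
        rw [hc, hget]
      rw [h1]
      have h3 : (List.filter (fun (j : Nat) => c (((j : Nat) : Int) + 1))
            (List.range t.length)).map
            ((fun (j : Nat) => PySem.List.pyGetD (v :: t) ((j : Nat) : Int) 0) ∘ Nat.succ)
          = (List.filter (fun (j : Nat) => c (((j : Nat) : Int) + 1))
            (List.range t.length)).map
            (fun (j : Nat) => PySem.List.pyGetD t ((j : Nat) : Int) 0) := by
        rw [h2]
      rw [h3]
      exact ih (fun i => c (i + 1))
    have hv : PySem.List.pyGetD (v :: t) (((0 : Nat) : Nat) : Int) 0 = v := by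
      simp [PySem.List.pyGetD, PySem.List.pyGet?, PySem.List.pyIdx?]
    simp only [List.length_cons, List.range_succ_eq_map, List.filter_cons, pvPick]
    by_cases h : c 0
    · rw [if_pos (by simpa using h), if_pos h, List.map_cons, hrest]
      simp [PySem.List.pyGetD, PySem.List.pyGet?, PySem.List.pyIdx?]
    · rw [if_neg (by simpa using h), if_neg h]
      exact hrest

-- B's sorted distinct in-range index set IS the ascending list of in-range positions in indices.
lemma valid_eq (lst : List Int) (indices : List Int) :
    PySem.List.sorted
        (PySem.Set.ofList (indices.filter
          (fun i => decide (0 ≤ i) && decide (i < (lst.length : Int)))))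
        (fun i => i)
      = ((List.range lst.length).map (fun (j : Nat) => ((j : Nat) : Int))).filter
          (fun i => decide (i ∈ indices)) := by
  apply PySem.List.sorted_eq_of_perm_of_pairwise_lt
  · rw [List.perm_ext_iff_of_nodup]
    · intro a
      simp only [List.mem_filter, List.mem_map, List.mem_range,
        PySem.Set.mem_ofList, decide_eq_true_eq, Bool.and_eq_true]
      constructor
      · rintro ⟨⟨j, hj, rfl⟩, ha⟩
        refine ⟨ha, by positivity, by exact_mod_cast hj⟩
      · rintro ⟨ha, h0, h1⟩
        refine ⟨⟨a.toNat, by omega, by omega⟩, ha⟩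
    · exact ((List.pairwise_lt_range.map (fun (j : Nat) => ((j : Nat) : Int))
        (by intro a b hab; show ((a : Nat) : Int) < ((b : Nat) : Int); exact_mod_cast hab)).filter _).nodup
    · exact PySem.Set.nodup_ofList _
  · exact (List.pairwise_lt_range.map (fun (j : Nat) => ((j : Nat) : Int))
      (by intro a b hab; show ((a : Nat) : Int) < ((b : Nat) : Int); exact_mod_cast hab)).filter _

-- A's membership test agrees with plain list membership.
lemma contains_ofList (indices : List Int) (i : Int) :
    PySem.Set.contains (PySem.Set.ofList indices) i = decide (i ∈ indices) := by
  simp [PySem.Set.contains, PySem.Set.mem_ofList]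

-- ===== VERDICT (by name: the statement is the Claim_ definition above) =====
theorem multi_pop_spec : Claim_equal_multi_pop := by
  intro lst indices _
  unfold Spec_multi_pop multi_pop multi_pop_alt
  simp only []
  have hbody : (fun (s : List Int × List Int) (p : Int × Int) =>
        if PySem.Set.contains (PySem.Set.ofList indices) p.1
        then (s.1 ++ [p.2], s.2) else (s.1, s.2 ++ [p.2]))
      = (fun (s : List Int × List Int) (p : Int × Int) =>
        (if PySem.Set.contains (PySem.Set.ofList indices) p.1 then s.1 ++ [p.2] else s.1,
         if PySem.Set.contains (PySem.Set.ofList indices) p.1 then s.2 else s.2 ++ [p.2])) := by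
    funext s p; split_ifs <;> rfl
  rw [hbody, PySem.List.foldl_prod_mk
        (f := fun (acc : List Int) (p : Int × Int) =>
          if PySem.Set.contains (PySem.Set.ofList indices) p.1 then acc ++ [p.2] else acc)
        (g := fun (acc : List Int) (p : Int × Int) =>
          if PySem.Set.contains (PySem.Set.ofList indices) p.1 then acc else acc ++ [p.2])]
  simp only [PySem.List.foldl_append_if (p := fun p : Int × Int =>
      PySem.Set.contains (PySem.Set.ofList indices) p.1) (f := Prod.snd)]
  rw [valid_eq, List.filter_map, List.map_map]
  have h1 : ((fun i => decide (i ∈ indices)) ∘ (fun (j : Nat) => ((j : Nat) : Int)))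
      = (fun (j : Nat) => decide (((j : Nat) : Int) ∈ indices)) := rfl
  have h2 : ((fun i => PySem.List.pyGetD lst i 0) ∘ (fun (j : Nat) => ((j : Nat) : Int)))
      = (fun (j : Nat) => PySem.List.pyGetD lst ((j : Nat) : Int) 0) := rfl
  rw [h1, h2, pick_range lst (fun i => decide (i ∈ indices))]
  have he := pick_enumerate lst
      (fun i => PySem.Set.contains (PySem.Set.ofList indices) i) 0
  simp only [add_zero] at he
  have hpc : (fun i => PySem.Set.contains (PySem.Set.ofList indices) i)
      = (fun i => decide (i ∈ indices)) := by
    funext i; rw [contains_ofList]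
  rw [hpc] at he
  rw [List.nil_append, he]
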